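-- pv_equiv track=rewrite | github.com/whisperity/dotfiles | dotfiles/argument_expander.py | package_glob
-- ===== SOURCE A (Python) =====
-- def package_glob(available_packages, globbing_expr):
--     """
--     Performs a globbing of the given expression over the list of available
--     names.
--
--     Valid globbers are '*' and '__ALL__' as in "foo.*" which means "every
--     package under foo".
--
--     :return: The list of all packages globbed and expanded.
--     """
--     # Start out with everything that isn't a globbing expression:
--     ret = set([normal for normal in globbing_expr
--                if not normal.endswith(('*', '__ALL__'))])
--
--     for name in set(globbing_expr) - ret:
--         if not any(globstar in name
--                    for globstar in ['.*', '.__ALL__']):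
--             raise ValueError("Please specify a tree with a closing . before "
--                              "the * or __ALL__.")
--         namespace = name.replace('.*', '', 1).replace('.__ALL__', '', 1)
--         if '*' in namespace or '__ALL__' in namespace:
--             raise ValueError("Do not specify multiple *s or __ALL__s in the "
--                              "same tree name.")
--
--         globbed_packages = [logical_name for logical_name in available_packages
--                             if logical_name.startswith(namespace)]
--         ret.update(globbed_packages)
--
--     return ret
-- ===== SOURCE B (Python) =====
-- def package_glob(available_packages, globbing_expr):
--     """
--     Performs a globbing of the given expression over the list of available
--     names ('*' / '__ALL__' as in "foo.*" = every package under foo).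
--
--     Instead of scanning the whole package list once per glob, build a prefix
--     index once (every prefix of every package -> the packages carrying it, in
--     first-appearance order); each glob is then a single dictionary lookup.
--     """
--     pairs = [(package[:k], package)
--              for package in available_packages
--              for k in range(len(package) + 1)]
--     index = {}
--     for prefix, package in pairs:
--         index.setdefault(prefix, []).append(package)
--
--     result = set(expr for expr in globbing_expr
--                  if not expr.endswith(('*', '__ALL__')))
--     for expr in globbing_expr:
--         if expr.endswith(('*', '__ALL__')):
--             if '.*' not in expr and '.__ALL__' not in expr:
--                 raise ValueError("Please specify a tree with a closing . "
--                                  "before the * or __ALL__.")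
--             namespace = expr.replace('.*', '', 1).replace('.__ALL__', '', 1)
--             if '*' in namespace or '__ALL__' in namespace:
--                 raise ValueError("Do not specify multiple *s or __ALL__s "
--                                  "in the same tree name.")
--             result.update(index.get(namespace, []))
--     return result
-- ===== Notes on version B (the rewrite author's own statement) =====
-- stated objective: alternative
-- what changed: A scans the whole available_packages list once per glob expression; B builds a prefix index once (a dict mapping every prefix of every package to the packages carrying it) so each glob becomes a single dictionary lookup, and validates/expands the globs in one ordinary pass instead of iterating a set difference.
import Mathlib
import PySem

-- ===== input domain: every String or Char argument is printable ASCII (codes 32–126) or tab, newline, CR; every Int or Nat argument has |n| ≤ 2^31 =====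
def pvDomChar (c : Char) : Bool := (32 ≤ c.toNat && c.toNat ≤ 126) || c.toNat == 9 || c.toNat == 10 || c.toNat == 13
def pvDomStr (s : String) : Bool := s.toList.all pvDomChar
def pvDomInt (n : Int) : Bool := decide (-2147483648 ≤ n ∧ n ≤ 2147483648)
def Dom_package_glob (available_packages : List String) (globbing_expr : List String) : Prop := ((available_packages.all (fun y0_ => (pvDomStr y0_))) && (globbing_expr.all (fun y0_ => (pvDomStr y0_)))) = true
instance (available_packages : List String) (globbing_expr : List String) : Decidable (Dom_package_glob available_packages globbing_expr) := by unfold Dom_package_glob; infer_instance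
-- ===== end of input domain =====

-- B replaces A's per-glob linear scan of available_packages by a prefix index built once
-- (a dict mapping every prefix of every package to the packages carrying it), so each glob
-- becomes a single dictionary lookup; equal on every input where A does not raise.

-- s.replace(old, new, 1): replace the FIRST occurrence of old.  Not in PySem (PySem.Str.replace
-- replaces all); exact for old ≠ "" (only ".*" / ".__ALL__" are used): PySem.Chars.find locates
-- the first occurrence, which is spliced out by take/drop.  Used by both ports.
def pyReplaceFirst (s : String) (old : String) (new : String) : String :=
  let l := s.toList
  let i := PySem.Chars.find l old.toList
  if i = -1 then s
  else String.ofList (l.take i.toNat ++ new.toList ++ l.drop (i.toNat + old.toList.length))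

-- ===== PORT A =====
def package_glob (available_packages : List String) (globbing_expr : List String) : List String :=
  -- ret = set(non-globbing expressions)
  let ret : PySem.Set String :=
    PySem.Set.ofList (globbing_expr.filter
      (fun normal => !(PySem.Str.endswith normal "*" || PySem.Str.endswith normal "__ALL__")))
  -- for name in set(globbing_expr) - ret: ...
  List.foldl (fun ret name =>
      if !(PySem.Str.isIn ".*" name || PySem.Str.isIn ".__ALL__" name) then
        ret  -- raise ValueError ("closing . before the * or __ALL__"): excluded by Pre_package_glob
      else
        let namespace_ := pyReplaceFirst (pyReplaceFirst name ".*" "") ".__ALL__" ""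
        if PySem.Str.isIn "*" namespace_ || PySem.Str.isIn "__ALL__" namespace_ then
          ret  -- raise ValueError ("multiple *s or __ALL__s"): excluded by Pre_package_glob
        else
          PySem.Set.update ret (available_packages.filter
            (fun logical_name => PySem.Str.startswith logical_name namespace_)))
    ret ((PySem.Set.ofList globbing_expr).diff ret)

-- ===== PORT B =====
-- the prefix index of Source B: pairs = [(package[:k], package) ...]; then
-- index.setdefault(prefix, []).append(package)  =  modify prefix [] (· ++ [package])
def pgIndex (available_packages : List String) : PySem.Dict String (List String) :=
  let pairs := available_packages.flatMap (fun package =>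
    (PySem.List.pyRange 0 (PySem.Str.len package + 1)).map
      (fun k => (PySem.Str.slice package none (some k), package)))
  pairs.foldl (fun d p => PySem.Dict.modify d p.1 [] (fun x => x ++ [p.2])) PySem.Dict.empty

def package_glob_alt (available_packages : List String) (globbing_expr : List String) : List String :=
  let index := pgIndex available_packages
  let result := PySem.Set.ofList (globbing_expr.filter
      (fun expr => !(PySem.Str.endswith expr "*" || PySem.Str.endswith expr "__ALL__")))
  globbing_expr.foldl (fun result expr =>
      if PySem.Str.endswith expr "*" || PySem.Str.endswith expr "__ALL__" then
        if !(PySem.Str.isIn ".*" expr) && !(PySem.Str.isIn ".__ALL__" expr) then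
          result  -- raise ValueError: excluded by Pre_package_glob
        else
          let namespace_ := pyReplaceFirst (pyReplaceFirst expr ".*" "") ".__ALL__" ""
          if PySem.Str.isIn "*" namespace_ || PySem.Str.isIn "__ALL__" namespace_ then
            result  -- raise ValueError: excluded by Pre_package_glob
          else
            PySem.Set.update result (PySem.Dict.getD index namespace_ [])
      else result)
    result

-- ===== PRECONDITION & SPEC =====
-- Pre_ excludes exactly the inputs on which A raises ValueError: a globbing expression (one
-- ending in '*' or '__ALL__') that lacks a '.*'/'.__ALL__' part, or whose namespace still
-- contains '*' or '__ALL__' after the first '.*' and '.__ALL__' are removed.  B raises there too.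
def Pre_package_glob (available_packages : List String) (globbing_expr : List String) : Prop :=
  ∀ e ∈ globbing_expr,
    (PySem.Str.endswith e "*" || PySem.Str.endswith e "__ALL__") = true →
      ((PySem.Str.isIn ".*" e || PySem.Str.isIn ".__ALL__" e) = true ∧
       (PySem.Str.isIn "*" (pyReplaceFirst (pyReplaceFirst e ".*" "") ".__ALL__" "") ||
        PySem.Str.isIn "__ALL__" (pyReplaceFirst (pyReplaceFirst e ".*" "") ".__ALL__" "")) = false)
instance (available_packages : List String) (globbing_expr : List String) : Decidable (Pre_package_glob available_packages globbing_expr) := by unfold Pre_package_glob; infer_instance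

def pvWitness_package_glob : List String × List String :=
  (["a.x", "a.y", "b.z"], ["a.*", "b.z"])

def Spec_package_glob (available_packages : List String) (globbing_expr : List String) (out : List String) : Prop := out = package_glob_alt available_packages globbing_expr
instance (available_packages : List String) (globbing_expr : List String) (out : List String) : Decidable (Spec_package_glob available_packages globbing_expr out) := by unfold Spec_package_glob; infer_instance

-- ===== CLAIM (what is proved, stated in full; the proofs are below) =====
def Claim_equal_package_glob : Prop := ∀ (available_packages : List String) (globbing_expr : List String), Dom_package_glob available_packages globbing_expr → Pre_package_glob available_packages globbing_expr → Spec_package_glob available_packages globbing_expr (package_glob available_packages globbing_expr)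

-- ===== LEMMAS AND PROOFS =====

-- a loop of set.update's is one update with the concatenation of the blocks
theorem pvFoldlUpdate_eq_update_flatMap {α β : Type} [BEq β] (g : α → List β) :
    ∀ (L : List α) (s : PySem.Set β),
      L.foldl (fun s x => PySem.Set.update s (g x)) s = PySem.Set.update s (L.flatMap g) := by
  intro L
  induction L with
  | nil => intro s; simp [PySem.Set.update_nil]
  | cons x L ih =>
      intro s
      simp only [List.foldl_cons, List.flatMap_cons, PySem.Set.update_append]
      exact ih _

-- updating with elements already present does nothing
theorem pvUpdate_of_subset {β : Type} [BEq β] [LawfulBEq β] (s : PySem.Set β) (xs : List β)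
    (h : ∀ y ∈ xs, y ∈ s) : PySem.Set.update s xs = s := by
  rw [PySem.Set.update_eq_append_filter]
  have hnil : List.filter (fun y => !s.contains y) (PySem.Set.ofList xs) = [] := by
    apply List.filter_eq_nil_iff.mpr
    intro y hy
    have hys : y ∈ s := h y ((PySem.Set.mem_ofList xs y).mp hy)
    simpa using hys
  rw [hnil, List.append_nil]

-- dropping the copies of x from the block list does not change the update,
-- provided x's block is already contained in the set
theorem pvUpdate_flatMap_filter_ne {α β : Type} [BEq α] [LawfulBEq α] [BEq β] [LawfulBEq β]
    (g : α → List β) (x : α) :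
    ∀ (M : List α) (s : PySem.Set β), (∀ y ∈ g x, y ∈ s) →
      PySem.Set.update s ((M.filter (fun z => !(z == x))).flatMap g)
        = PySem.Set.update s (M.flatMap g) := by
  intro M
  induction M with
  | nil => intro s _; rfl
  | cons z M ih =>
      intro s hs
      by_cases hzx : z = x
      · subst hzx
        rw [List.filter_cons_of_neg (by simp), List.flatMap_cons, PySem.Set.update_append,
          pvUpdate_of_subset s (g z) hs]
        exact ih s hs
      · rw [List.filter_cons_of_pos (by simp [beq_eq_false_iff_ne.mpr hzx]),
          List.flatMap_cons, List.flatMap_cons, PySem.Set.update_append,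
          PySem.Set.update_append]
        exact ih (PySem.Set.update s (g z))
          (fun y hy => (PySem.Set.mem_update s (g z) y).mpr (Or.inl (hs y hy)))

-- deduplicating the glob list before expanding it does not change the resulting set
theorem pvUpdate_flatMap_ofList {α β : Type} [BEq α] [LawfulBEq α] [BEq β] [LawfulBEq β]
    (g : α → List β) :
    ∀ (L : List α) (s : PySem.Set β),
      PySem.Set.update s ((PySem.Set.ofList L).flatMap g) = PySem.Set.update s (L.flatMap g) := by
  intro L
  induction L with
  | nil => intro s; rfl
  | cons x L ih =>
      intro s
      have hdis : (PySem.Set.ofList L).discard x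
          = (PySem.Set.ofList L).filter (fun z => !(z == x)) := rfl
      simp only [PySem.Set.ofList_cons, hdis, List.flatMap_cons, PySem.Set.update_append]
      rw [pvUpdate_flatMap_filter_ne g x (PySem.Set.ofList L) (PySem.Set.update s (g x))
        (fun y hy => (PySem.Set.mem_update s (g x) y).mpr (Or.inr hy))]
      exact ih _

-- set(xs) commutes with filtering
theorem pvOfList_filter {α : Type} [BEq α] [LawfulBEq α] (p : α → Bool) :
    ∀ (L : List α), (PySem.Set.ofList L).filter p = PySem.Set.ofList (L.filter p) := by
  intro L
  induction L with
  | nil => rfl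
  | cons x L ih =>
      have hq : ∀ (M : List α), PySem.Set.discard M x = M.filter (fun z => !(z == x)) :=
        fun _ => rfl
      by_cases hp : p x = true
      · rw [PySem.Set.ofList_cons, hq, List.filter_cons_of_pos hp,
          List.filter_cons_of_pos hp, PySem.Set.ofList_cons, hq, ← ih,
          List.filter_filter, List.filter_filter]
        congr 1
        apply List.filter_congr
        intro z _
        exact Bool.and_comm _ _
      · have hp' : p x = false := by simpa using hp
        rw [PySem.Set.ofList_cons, hq, List.filter_cons_of_neg (by simp [hp']),
          List.filter_cons_of_neg (by simp [hp']), ← ih, List.filter_filter]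
        apply List.filter_congr
        intro z _
        by_cases hzx : z = x
        · subst hzx; simp [hp']
        · simp [beq_eq_false_iff_ne.mpr hzx]

-- A's iteration list set(globbing_expr) - ret is exactly set(the globbing expressions)
theorem pvDiff_eq_ofList_filter (P : String → Bool) (G : List String) :
    (PySem.Set.ofList G).diff (PySem.Set.ofList (G.filter (fun e => !(P e))))
      = PySem.Set.ofList (G.filter P) := by
  have hdiff : (PySem.Set.ofList G).diff (PySem.Set.ofList (G.filter (fun e => !(P e))))
      = (PySem.Set.ofList G).filter
          (fun x => !(PySem.Set.contains (PySem.Set.ofList (G.filter (fun e => !(P e)))) x)) := rfl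
  rw [hdiff, ← pvOfList_filter P G]
  apply List.filter_congr
  intro x hx
  have hxG : x ∈ G := (PySem.Set.mem_ofList G x).mp hx
  by_cases hP : P x = true
  · simp [PySem.Set.mem_ofList, List.mem_filter, hP, hxG]
  · have hP' : P x = false := by simpa using hP
    simp [PySem.Set.mem_ofList, List.mem_filter, hP', hxG]

-- strings are equal when their character lists are
theorem pvStrExt (s t : String) (h : s.toList = t.toList) : s = t := by
  have h1 : String.ofList s.toList = String.ofList t.toList := by rw [h]
  rwa [String.ofList_toList, String.ofList_toList] at h1

-- the range filter picking out a single index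
theorem pvFilterRangeBeq (j : Nat) :
    ∀ n, (List.range n).filter (fun i => i == j) = if j < n then [j] else [] := by
  intro n
  induction n with
  | zero => simp
  | succ m ih =>
      rw [List.range_succ, List.filter_append, ih]
      by_cases h1 : j < m
      · rw [if_pos h1, if_pos (by omega)]
        have : (m == j) = false := by simp; omega
        simp [this]
      · by_cases h2 : j = m
        · subst h2
          rw [if_neg h1, if_pos (by omega)]
          simp
        · rw [if_neg h1, if_neg (by omega)]
          have : (m == j) = false := by simp; omega
          simp [this]

-- the indices i ≤ |cs| whose prefix cs[:i] equals ns: exactly [|ns|] if ns is a prefix, else none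
theorem pvFilterRangePrefix (cs : List Char) (ns : String) :
    (List.range (cs.length + 1)).filter (fun i => String.ofList (cs.take i) == ns)
      = if PySem.Chars.startswith cs ns.toList then [ns.toList.length] else [] := by
  by_cases h : PySem.Chars.startswith cs ns.toList = true
  · have hpre : ns.toList <+: cs := (PySem.Chars.startswith_iff cs ns.toList).mp h
    have hlen : ns.toList.length ≤ cs.length := hpre.length_le
    have htake : cs.take ns.toList.length = ns.toList :=
      (List.prefix_iff_eq_take.mp hpre).symm
    rw [if_pos h]
    have hcongr : (List.range (cs.length + 1)).filter
        (fun i => String.ofList (cs.take i) == ns)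
        = (List.range (cs.length + 1)).filter (fun i => i == ns.toList.length) := by
      apply List.filter_congr
      intro i hi
      have hile : i ≤ cs.length := by
        have := List.mem_range.mp hi; omega
      by_cases he : String.ofList (cs.take i) = ns
      · have hl : cs.take i = ns.toList := by
          rw [← he, String.toList_ofList]
        have hi' : i = ns.toList.length := by
          have := congrArg List.length hl
          simpa [List.length_take, Nat.min_eq_left hile] using this
        rw [hi', htake, String.ofList_toList]
        simp
      · have hne : i ≠ ns.toList.length := by
          intro hij
          apply he
          rw [hij, htake, String.ofList_toList]
        rw [beq_eq_false_iff_ne.mpr he, beq_eq_false_iff_ne.mpr hne]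
    rw [hcongr, pvFilterRangeBeq, if_pos (by omega)]
  · rw [if_neg h]
    apply List.filter_eq_nil_iff.mpr
    intro i _ hbeq
    apply h
    have he : String.ofList (cs.take i) = ns := eq_of_beq hbeq
    have hl : cs.take i = ns.toList := by rw [← he, String.toList_ofList]
    exact (PySem.Chars.startswith_iff cs ns.toList).mpr (hl ▸ List.take_prefix i cs)

-- per package: its contribution to the pairs list, filtered at key ns, is [package] iff it
-- starts with ns
theorem pvInnerPairs (p ns : String) :
    ((((PySem.List.pyRange 0 (PySem.Str.len p + 1)).map
        (fun k => (PySem.Str.slice p none (some k), p))).filter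
      (fun pr => pr.1 == ns)).map (fun pr => pr.2))
      = if PySem.Str.startswith p ns then [p] else [] := by
  have hlen : PySem.Str.len p + 1 = ((p.toList.length + 1 : Nat) : Int) := by
    simp [PySem.Str.len]
  rw [hlen, PySem.List.pyRange_zero_natCast, List.map_map]
  have hslice : ∀ i : Nat, i < p.toList.length + 1 →
      PySem.Str.slice p none (some (i : Int)) = String.ofList (p.toList.take i) := by
    intro i _
    apply pvStrExt
    rw [PySem.Str.toList_slice, PySem.Chars.slice_eq_listSlice,
      PySem.List.slice_to _ (by positivity), String.toList_ofList]
    simp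
  have hcongr : (List.range (p.toList.length + 1)).map
        ((fun k => (PySem.Str.slice p none (some k), p)) ∘ (fun k : Nat => (k : Int)))
      = (List.range (p.toList.length + 1)).map
        (fun i => (String.ofList (p.toList.take i), p)) := by
    apply List.map_congr_left
    intro i hi
    simp only [Function.comp]
    rw [hslice i (List.mem_range.mp hi)]
  rw [hcongr, List.filter_map, List.map_map]
  have hfc : (List.range (p.toList.length + 1)).filter
        ((fun pr : String × String => pr.1 == ns) ∘ (fun i => (String.ofList (p.toList.take i), p)))
      = (List.range (p.toList.length + 1)).filter
        (fun i => String.ofList (p.toList.take i) == ns) := rfl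
  rw [hfc, pvFilterRangePrefix, PySem.Str.startswith_eq]
  by_cases h : PySem.Chars.startswith p.toList ns.toList = true
  · simp [h]
  · simp [h]

-- a flatMap of guarded singletons is a filter
theorem pvFlatMapIf {α : Type} (q : α → Bool) :
    ∀ (l : List α), l.flatMap (fun x => if q x then [x] else []) = l.filter q := by
  intro l
  induction l with
  | nil => rfl
  | cons x l ih =>
      rw [List.flatMap_cons, ih]
      by_cases h : q x = true
      · rw [if_pos h, List.filter_cons_of_pos h]; rfl
      · rw [if_neg h, List.filter_cons_of_neg (by simpa using h), List.nil_append]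

-- the index lookup at ns is exactly the per-glob scan of A
theorem pvGetD_pgIndex (aps : List String) (ns : String) :
    PySem.Dict.getD (pgIndex aps) ns [] = aps.filter (fun p => PySem.Str.startswith p ns) := by
  show PySem.Dict.getD
      ((aps.flatMap (fun package =>
        (PySem.List.pyRange 0 (PySem.Str.len package + 1)).map
          (fun k => (PySem.Str.slice package none (some k), package)))).foldl
        (fun d p => PySem.Dict.modify d p.1 [] (fun x => x ++ [p.2])) PySem.Dict.empty) ns []
      = aps.filter (fun p => PySem.Str.startswith p ns)
  rw [PySem.Dict.getD_foldl_modify_append]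
  have hempty : (PySem.Dict.empty : PySem.Dict String (List String)).getD ns [] = [] := rfl
  rw [hempty, List.nil_append, List.filter_flatMap, List.map_flatMap]
  have : ∀ p ∈ aps,
      ((((PySem.List.pyRange 0 (PySem.Str.len p + 1)).map
          (fun k => (PySem.Str.slice p none (some k), p))).filter
        (fun pr => pr.1 == ns)).map (fun pr => pr.2))
        = if PySem.Str.startswith p ns then [p] else [] := fun p _ => pvInnerPairs p ns
  rw [List.flatMap_congr this]
  exact pvFlatMapIf _ aps

-- ===== VERDICT (by name: the statement is the Claim_ definition above) =====
theorem package_glob_spec : Claim_equal_package_glob := by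
  intro available_packages globbing_expr _hdom hpre
  unfold Spec_package_glob
  -- both ports equal: update the set of plain names with, per glob expression (in order),
  -- the packages that start with its namespace
  have hA : package_glob available_packages globbing_expr
      = PySem.Set.update
          (PySem.Set.ofList (globbing_expr.filter (fun e =>
            !(PySem.Str.endswith e "*" || PySem.Str.endswith e "__ALL__"))))
          ((globbing_expr.filter (fun e =>
              PySem.Str.endswith e "*" || PySem.Str.endswith e "__ALL__")).flatMap
            (fun e => available_packages.filter (fun p => PySem.Str.startswith p
              (pyReplaceFirst (pyReplaceFirst e ".*" "") ".__ALL__" "")))) := by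
    show List.foldl (fun ret name =>
          if !(PySem.Str.isIn ".*" name || PySem.Str.isIn ".__ALL__" name) then ret
          else
            let namespace_ := pyReplaceFirst (pyReplaceFirst name ".*" "") ".__ALL__" ""
            if PySem.Str.isIn "*" namespace_ || PySem.Str.isIn "__ALL__" namespace_ then ret
            else
              PySem.Set.update ret (available_packages.filter
                (fun logical_name => PySem.Str.startswith logical_name namespace_)))
        (PySem.Set.ofList (globbing_expr.filter (fun e =>
          !(PySem.Str.endswith e "*" || PySem.Str.endswith e "__ALL__"))))
        ((PySem.Set.ofList globbing_expr).diff
          (PySem.Set.ofList (globbing_expr.filter (fun e =>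
            !(PySem.Str.endswith e "*" || PySem.Str.endswith e "__ALL__")))))
      = _
    rw [pvDiff_eq_ofList_filter
      (fun e => PySem.Str.endswith e "*" || PySem.Str.endswith e "__ALL__") globbing_expr]
    refine Eq.trans (PySem.List.foldl_congr_mem _ _
        (fun ret name => PySem.Set.update ret (available_packages.filter
          (fun p => PySem.Str.startswith p
            (pyReplaceFirst (pyReplaceFirst name ".*" "") ".__ALL__" "")))) _ ?_) ?_
    · intro acc name hname
      have hmem := (PySem.Set.mem_ofList _ name).mp hname
      have hGname : name ∈ globbing_expr := (List.mem_filter.mp hmem).1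
      have hPname : (PySem.Str.endswith name "*" || PySem.Str.endswith name "__ALL__") = true := by
        simpa using (List.mem_filter.mp hmem).2
      obtain ⟨h1, h2⟩ := hpre name hGname hPname
      beta_reduce
      rw [if_neg (by rw [h1]; decide)]
      set R := pyReplaceFirst (pyReplaceFirst name ".*" "") ".__ALL__" "" with hR
      show (if (PySem.Str.isIn "*" R || PySem.Str.isIn "__ALL__" R) = true then acc
          else PySem.Set.update acc (available_packages.filter
            (fun logical_name => PySem.Str.startswith logical_name R)))
        = PySem.Set.update acc (available_packages.filter
            (fun p => PySem.Str.startswith p R))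
      rw [if_neg (by rw [h2]; decide)]
    · rw [pvFoldlUpdate_eq_update_flatMap (fun e => available_packages.filter
          (fun p => PySem.Str.startswith p
            (pyReplaceFirst (pyReplaceFirst e ".*" "") ".__ALL__" ""))),
        pvUpdate_flatMap_ofList (fun e => available_packages.filter
          (fun p => PySem.Str.startswith p
            (pyReplaceFirst (pyReplaceFirst e ".*" "") ".__ALL__" "")))]
  have hB : package_glob_alt available_packages globbing_expr
      = PySem.Set.update
          (PySem.Set.ofList (globbing_expr.filter (fun e =>
            !(PySem.Str.endswith e "*" || PySem.Str.endswith e "__ALL__"))))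
          ((globbing_expr.filter (fun e =>
              PySem.Str.endswith e "*" || PySem.Str.endswith e "__ALL__")).flatMap
            (fun e => available_packages.filter (fun p => PySem.Str.startswith p
              (pyReplaceFirst (pyReplaceFirst e ".*" "") ".__ALL__" "")))) := by
    show List.foldl (fun result expr =>
          if PySem.Str.endswith expr "*" || PySem.Str.endswith expr "__ALL__" then
            if !(PySem.Str.isIn ".*" expr) && !(PySem.Str.isIn ".__ALL__" expr) then
              result
            else
              let namespace_ := pyReplaceFirst (pyReplaceFirst expr ".*" "") ".__ALL__" ""
              if PySem.Str.isIn "*" namespace_ || PySem.Str.isIn "__ALL__" namespace_ then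
                result
              else
                PySem.Set.update result
                  (PySem.Dict.getD (pgIndex available_packages) namespace_ [])
          else result)
        (PySem.Set.ofList (globbing_expr.filter (fun e =>
          !(PySem.Str.endswith e "*" || PySem.Str.endswith e "__ALL__")))) globbing_expr
      = _
    rw [PySem.List.foldl_if_eq_foldl_filter
      (fun expr => PySem.Str.endswith expr "*" || PySem.Str.endswith expr "__ALL__")
      (fun result expr =>
        if !(PySem.Str.isIn ".*" expr) && !(PySem.Str.isIn ".__ALL__" expr) then
          result
        else
          let namespace_ := pyReplaceFirst (pyReplaceFirst expr ".*" "") ".__ALL__" ""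
          if PySem.Str.isIn "*" namespace_ || PySem.Str.isIn "__ALL__" namespace_ then
            result
          else
            PySem.Set.update result
              (PySem.Dict.getD (pgIndex available_packages) namespace_ []))]
    refine Eq.trans (PySem.List.foldl_congr_mem _ _
        (fun result expr => PySem.Set.update result (available_packages.filter
          (fun p => PySem.Str.startswith p
            (pyReplaceFirst (pyReplaceFirst expr ".*" "") ".__ALL__" "")))) _ ?_) ?_
    · intro acc expr hexpr
      have hGe : expr ∈ globbing_expr := (List.mem_filter.mp hexpr).1
      have hPe : (PySem.Str.endswith expr "*" || PySem.Str.endswith expr "__ALL__") = true := by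
        simpa using (List.mem_filter.mp hexpr).2
      obtain ⟨h1, h2⟩ := hpre expr hGe hPe
      beta_reduce
      have hguard : (!(PySem.Str.isIn ".*" expr) && !(PySem.Str.isIn ".__ALL__" expr)) = false := by
        cases ha : PySem.Str.isIn ".*" expr
        · cases hb : PySem.Str.isIn ".__ALL__" expr
          · rw [ha, hb] at h1; exact absurd h1 (by decide)
          · simp
        · simp
      rw [if_neg (by rw [hguard]; exact Bool.false_ne_true)]
      set R := pyReplaceFirst (pyReplaceFirst expr ".*" "") ".__ALL__" "" with hR
      show (if (PySem.Str.isIn "*" R || PySem.Str.isIn "__ALL__" R) = true then acc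
          else PySem.Set.update acc (PySem.Dict.getD (pgIndex available_packages) R []))
        = PySem.Set.update acc (available_packages.filter
            (fun p => PySem.Str.startswith p R))
      rw [if_neg (by rw [h2]; decide), pvGetD_pgIndex]
    · rw [pvFoldlUpdate_eq_update_flatMap (fun e => available_packages.filter
          (fun p => PySem.Str.startswith p
            (pyReplaceFirst (pyReplaceFirst e ".*" "") ".__ALL__" "")))]
  rw [hA, hB]
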